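-- pv_equiv track=rewrite | github.com/aikium-public/aiki-xp | aikixp/train.py | _pyramid_dims
-- ===== SOURCE A (Python) =====
-- from typing import Dict, List, Optional, Tuple
--
-- def _pyramid_dims(input_dim: int, target_dim: int, max_ratio: int = 4) -> List[int]:
--     """Compute layer dimensions for a gradual reduction pyramid.
--
--     Each intermediate layer reduces by at most ``max_ratio`` (default 4×).
--     When ``input_dim <= target_dim`` a single expansion layer is used.
--
--     After building the ideal pyramid, intermediate layers whose first-layer
--     param cost exceeds a safety cap are progressively removed.  This keeps
--     the architecture feasible for very high-dimensional inputs (e.g. Evo2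
--     at 8192-d) under tight parameter budgets.  The resulting first-step
--     ratio may exceed ``max_ratio`` but is still far better than a single
--     massive bottleneck that was the previous default.
--
--     Returns a list starting at *input_dim* and ending at *target_dim*,
--     e.g. ``[5120, 1280, 320, 256]`` for ``(5120, 256, 4)``.
--     """
--     if input_dim <= target_dim:
--         return [input_dim, target_dim]
--
--     # Build ideal pyramid (each step ≤ max_ratio)
--     dims = [input_dim]
--     current = input_dim
--     while current // max_ratio > target_dim:
--         current = current // max_ratio
--         dims.append(current)
--     dims.append(target_dim)
--
--     # Safety: if the first linear layer would consume >8M params on its own,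
--     # progressively remove intermediates so the solver can find a feasible width.
--     # 8M is ~80% of a 10M budget — leaves room for the head and later layers.
--     _MAX_FIRST_LAYER = 8_000_000
--     while len(dims) > 2 and dims[0] * dims[1] > _MAX_FIRST_LAYER:
--         dims = [dims[0]] + dims[2:]
--
--     return dims
-- ===== SOURCE B (Python) =====
-- def _pyramid_dims(input_dim: int, target_dim: int, max_ratio: int = 4):
--     """Fused single-pass pyramid: each intermediate is emitted only if its
--     first-layer param cost stays within the cap, so no trim pass is needed."""
--     if input_dim <= target_dim:
--         return [input_dim, target_dim]
--
--     def rest(current):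
--         nxt = current // max_ratio
--         if nxt <= target_dim:
--             return [target_dim]
--         tail = rest(nxt)
--         return [nxt] + tail if input_dim * nxt <= 8_000_000 else tail
--
--     return [input_dim] + rest(input_dim)
-- ===== Notes on version B (the rewrite author's own statement) =====
-- stated objective: simpler
-- what changed: B fuses A's build-then-trim into one recursive pass that conditionally includes each intermediate whose first-layer cost stays within the 8M cap, eliminating the list-slicing trim loop entirely.
-- outside the precondition, e.g. on _pyramid_dims(5, -3, -1): A returns [5, -3], B returns [5, -3]
import Mathlib
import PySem

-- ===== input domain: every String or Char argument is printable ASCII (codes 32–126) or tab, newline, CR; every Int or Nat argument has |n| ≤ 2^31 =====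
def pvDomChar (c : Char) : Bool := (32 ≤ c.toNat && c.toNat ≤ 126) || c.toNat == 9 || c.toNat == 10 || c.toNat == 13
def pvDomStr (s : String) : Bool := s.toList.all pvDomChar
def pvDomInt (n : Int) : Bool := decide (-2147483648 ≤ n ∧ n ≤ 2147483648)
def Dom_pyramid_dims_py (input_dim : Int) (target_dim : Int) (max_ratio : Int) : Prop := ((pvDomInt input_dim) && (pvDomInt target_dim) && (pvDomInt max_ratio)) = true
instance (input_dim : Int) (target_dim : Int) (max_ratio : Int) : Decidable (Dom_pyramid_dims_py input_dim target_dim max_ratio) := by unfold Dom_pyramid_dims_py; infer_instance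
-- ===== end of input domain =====

-- B fuses A's build-then-trim into one recursive pass with a conditional include; return-value equivalence proved on Pre_.

-- ===== PORT A =====
-- the 'while current // max_ratio > target_dim' build loop of A, with fuel (adequate on Pre_)
def pyLoopA (m t : Int) : Nat → Int → List Int → List Int
  | 0, _, dims => dims
  | f + 1, c, dims =>
    if t < PySem.Int.floordiv c m then
      pyLoopA m t f (PySem.Int.floordiv c m) (dims ++ [PySem.Int.floordiv c m])
    else dims

-- the 'while len(dims) > 2 and dims[0]*dims[1] > 8_000_000: dims = [dims[0]] + dims[2:]' trim loop of A
def pyTrimA : List Int → List Int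
  | a :: b :: c :: r => if 8000000 < a * b then pyTrimA (a :: c :: r) else a :: b :: c :: r
  | d => d

def pyramid_dims_py (input_dim : Int) (target_dim : Int) (max_ratio : Int) : List Int :=
  if input_dim ≤ target_dim then [input_dim, target_dim]
  else
    pyTrimA (pyLoopA max_ratio target_dim (input_dim.natAbs + 1) input_dim [input_dim] ++ [target_dim])

-- ===== PORT B =====
-- B's recursive 'rest(current)' helper, with fuel (adequate on Pre_)
def pyRestB (x t m : Int) : Nat → Int → List Int
  | 0, _ => [t]
  | f + 1, c =>
    let nxt := PySem.Int.floordiv c m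
    if nxt ≤ t then [t]
    else
      let tail := pyRestB x t m f nxt
      if x * nxt ≤ 8000000 then nxt :: tail else tail

def pyramid_dims_py_alt (input_dim : Int) (target_dim : Int) (max_ratio : Int) : List Int :=
  if input_dim ≤ target_dim then [input_dim, target_dim]
  else input_dim :: pyRestB input_dim target_dim max_ratio (input_dim.natAbs + 1) input_dim

-- ===== PRECONDITION & SPEC =====
-- Pre_ excludes max_ratio 0 (ZeroDivisionError) and, when input_dim > target_dim, max_ratio 1 (infinite
-- loop) and negative target_dim, where the reduction loop almost always diverges (current settles at a
-- non-positive fixpoint that stays above target_dim); A does return on the immediate-stop negative-ratio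
-- corner of that region, e.g. (5, -3, -1), which Pre_ also excludes.
def Pre_pyramid_dims_py (input_dim : Int) (target_dim : Int) (max_ratio : Int) : Prop :=
  input_dim ≤ target_dim ∨ (0 ≤ target_dim ∧ (2 ≤ max_ratio ∨ max_ratio ≤ -1))
instance (input_dim : Int) (target_dim : Int) (max_ratio : Int) : Decidable (Pre_pyramid_dims_py input_dim target_dim max_ratio) := by unfold Pre_pyramid_dims_py; infer_instance

def pvWitness_pyramid_dims_py : Int × Int × Int := (5120, 256, 4)

def Spec_pyramid_dims_py (input_dim : Int) (target_dim : Int) (max_ratio : Int) (out : List Int) : Prop := out = pyramid_dims_py_alt input_dim target_dim max_ratio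
instance (input_dim : Int) (target_dim : Int) (max_ratio : Int) (out : List Int) : Decidable (Spec_pyramid_dims_py input_dim target_dim max_ratio out) := by unfold Spec_pyramid_dims_py; infer_instance

-- ===== CLAIM (what is proved, stated in full; the proofs are below) =====
def Claim_equal_pyramid_dims_py : Prop := ∀ (input_dim : Int) (target_dim : Int) (max_ratio : Int), Dom_pyramid_dims_py input_dim target_dim max_ratio → Pre_pyramid_dims_py input_dim target_dim max_ratio → Spec_pyramid_dims_py input_dim target_dim max_ratio (pyramid_dims_py input_dim target_dim max_ratio)

-- ===== LEMMAS AND PROOFS =====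

-- the build loop without its accumulator
def pyBuildA (m t : Int) (f : Nat) (c : Int) : List Int := pyLoopA m t f c []

theorem pyLoopA_acc (m t : Int) (f : Nat) : ∀ (c : Int) (d : List Int),
    pyLoopA m t f c d = d ++ pyBuildA m t f c := by
  induction f with
  | zero => intro c d; simp [pyLoopA, pyBuildA]
  | succ f ih =>
    intro c d
    simp only [pyLoopA, pyBuildA]
    split
    · rw [ih, ih (PySem.Int.floordiv c m)]
      simp
    · simp

theorem pyBuildA_succ (m t : Int) (f : Nat) (c : Int) :
    pyBuildA m t (f + 1) c =
      if t < PySem.Int.floordiv c m then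
        PySem.Int.floordiv c m :: pyBuildA m t f (PySem.Int.floordiv c m)
      else [] := by
  simp only [pyBuildA, pyLoopA]
  split
  · rw [pyLoopA_acc]; simp [pyBuildA]
  · rfl

-- trimming x :: L ++ [t] drops the leading run of over-cap intermediates
theorem pyTrimA_dropWhile (x t : Int) : ∀ (L : List Int),
    pyTrimA (x :: (L ++ [t])) = x :: (L.dropWhile (fun e => decide (8000000 < x * e)) ++ [t]) := by
  intro L
  induction L with
  | nil => simp [pyTrimA]
  | cons b L ih =>
    obtain ⟨c, r, hcr⟩ : ∃ c r, L ++ [t] = c :: r := by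
      cases L with
      | nil => exact ⟨t, [], rfl⟩
      | cons a L' => exact ⟨a, L' ++ [t], rfl⟩
    show pyTrimA (x :: b :: (L ++ [t])) = _
    rw [hcr]
    simp only [pyTrimA]
    by_cases h : 8000000 < x * b
    · rw [if_pos h, ← hcr, ih]
      simp [List.dropWhile, h]
    · rw [if_neg h, ← hcr]
      simp [List.dropWhile, h]

-- B's rest = filtered build list ++ [t] (same fuel, unconditionally)
theorem pyRestB_eq_filter (x t m : Int) : ∀ (f : Nat) (c : Int),
    pyRestB x t m f c =
      (pyBuildA m t f c).filter (fun e => decide (x * e ≤ 8000000)) ++ [t] := by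
  intro f
  induction f with
  | zero => intro c; simp [pyRestB, pyBuildA, pyLoopA]
  | succ f ih =>
    intro c
    rw [pyBuildA_succ]
    simp only [pyRestB]
    by_cases h : t < PySem.Int.floordiv c m
    · rw [if_pos h, if_neg (by omega)]
      by_cases h2 : x * PySem.Int.floordiv c m ≤ 8000000
      · simp [h2, ih]
      · simp [h2, ih]
    · rw [if_neg h, if_pos (by omega)]
      simp

-- elements of the build list are strictly below the seed, and the list is decreasing
theorem pyBuildA_props (m t : Int) (hm : 2 ≤ m) (ht : 0 ≤ t) : ∀ (f : Nat) (c : Int),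
    (∀ e ∈ pyBuildA m t f c, e < c) ∧
      (pyBuildA m t f c).Pairwise (fun a b => b ≤ a) := by
  intro f
  induction f with
  | zero => intro c; simp [pyBuildA, pyLoopA]
  | succ f ih =>
    intro c
    rw [pyBuildA_succ]
    by_cases h : t < PySem.Int.floordiv c m
    · rw [if_pos h]
      have h1 : (t + 1) * m ≤ c :=
        (PySem.Int.le_floordiv_iff_mul_le (by omega)).mp (by omega)
      have hc : 0 < c := by nlinarith
      have hlt : PySem.Int.floordiv c m < c := by
        rw [PySem.Int.floordiv_lt_iff_lt_mul (by omega)]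
        nlinarith
      obtain ⟨ihlt, ihpw⟩ := ih (PySem.Int.floordiv c m)
      refine ⟨?_, ?_⟩
      · intro e he
        rcases List.mem_cons.mp he with h1 | h2
        · omega
        · have := ihlt e h2; omega
      · refine List.pairwise_cons.mpr ⟨?_, ihpw⟩
        intro e he; have := ihlt e he; omega
    · rw [if_neg h]; simp

-- dropWhile over-cap = filter under-cap on a decreasing list (the cap test is monotone)
theorem dropWhile_eq_filter_cap (x : Int) (hx : 0 ≤ x) : ∀ (L : List Int),
    L.Pairwise (fun a b => b ≤ a) →
    L.dropWhile (fun e => decide (8000000 < x * e)) =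
      L.filter (fun e => decide (x * e ≤ 8000000)) := by
  intro L
  induction L with
  | nil => simp
  | cons a L ih =>
    intro hpw
    obtain ⟨hhead, htail⟩ := List.pairwise_cons.mp hpw
    by_cases h : 8000000 < x * a
    · have h2 : ¬ (x * a ≤ 8000000) := by omega
      simp only [List.dropWhile, List.filter, h, h2, decide_true, decide_false]
      exact ih htail
    · have h2 : x * a ≤ 8000000 := by omega
      simp only [List.dropWhile, List.filter, h, h2, decide_true, decide_false]
      rw [List.filter_eq_self.mpr]
      intro e he
      have h3 : e ≤ a := hhead e he
      have : x * e ≤ x * a := mul_le_mul_of_nonneg_left h3 hx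
      simpa using by omega

-- ===== VERDICT (by name: the statement is the Claim_ definition above) =====
theorem pyramid_dims_py_spec : Claim_equal_pyramid_dims_py := by
  intro x t m _ hpre
  unfold Spec_pyramid_dims_py pyramid_dims_py pyramid_dims_py_alt
  by_cases hxt : x ≤ t
  · simp [hxt]
  · rw [if_neg hxt, if_neg hxt]
    rcases hpre with h | ⟨ht, hm⟩
    · exact absurd h hxt
    rcases hm with hm | hm
    · -- main case: max_ratio ≥ 2, target_dim ≥ 0
      rw [pyLoopA_acc]
      have hchain := pyBuildA_props m t hm ht (x.natAbs + 1) x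
      have e1 : ([x] ++ pyBuildA m t (x.natAbs + 1) x) ++ [t]
          = x :: (pyBuildA m t (x.natAbs + 1) x ++ [t]) := by simp
      rw [e1, pyTrimA_dropWhile, dropWhile_eq_filter_cap x (by omega) _ hchain.2,
        ← pyRestB_eq_filter]
    · -- max_ratio ≤ -1: the loop runs zero times on both sides
      have hdiv : PySem.Int.floordiv x m ≤ 0 := by
        have heq := PySem.Int.floordiv_mul_add_mod x m
        have hmb := PySem.Int.mod_neg_bounds x (b := m) (by omega)
        nlinarith [heq, hmb.1, hmb.2]
      have hstop : ¬ (t < PySem.Int.floordiv x m) := by omega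
      have hA : pyLoopA m t (x.natAbs + 1) x [x] = [x] := by
        simp only [pyLoopA, if_neg hstop]
      have hB : pyRestB x t m (x.natAbs + 1) x = [t] := by
        simp only [pyRestB]
        rw [if_pos (by omega)]
      rw [hA, hB]
      simp [pyTrimA]
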